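-- pv_equiv track=rewrite | github.com/paiml/depyler | examples/hard_functional_patterns.py | pipeline_nested
-- ===== SOURCE A (Python) =====
-- def pipeline_nested(vals: list[int], threshold: int) -> int:
--     """Chain: filter > threshold -> square -> take sum -> add offset."""
--     filtered: list[int] = []
--     for v in vals:
--         if v > threshold:
--             filtered.append(v)
--     squared: list[int] = []
--     for v in filtered:
--         squared.append(v * v)
--     total: int = 0
--     for v in squared:
--         total += v
--     return total + len(filtered)
-- ===== SOURCE B (Python) =====
-- def pipeline_nested(vals: list[int], threshold: int) -> int:
--     """Single pass: accumulate sum of squares and count of values above threshold."""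
--     total = 0
--     count = 0
--     for v in vals:
--         if v > threshold:
--             total += v * v
--             count += 1
--     return total + count
-- ===== Notes on version B (the rewrite author's own statement) =====
-- stated objective: simpler
-- what changed: Replaced the three sequential loops building two intermediate lists (filter, square, sum) with one pass over vals maintaining only a sum-of-squares and a count accumulator.
import Mathlib
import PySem

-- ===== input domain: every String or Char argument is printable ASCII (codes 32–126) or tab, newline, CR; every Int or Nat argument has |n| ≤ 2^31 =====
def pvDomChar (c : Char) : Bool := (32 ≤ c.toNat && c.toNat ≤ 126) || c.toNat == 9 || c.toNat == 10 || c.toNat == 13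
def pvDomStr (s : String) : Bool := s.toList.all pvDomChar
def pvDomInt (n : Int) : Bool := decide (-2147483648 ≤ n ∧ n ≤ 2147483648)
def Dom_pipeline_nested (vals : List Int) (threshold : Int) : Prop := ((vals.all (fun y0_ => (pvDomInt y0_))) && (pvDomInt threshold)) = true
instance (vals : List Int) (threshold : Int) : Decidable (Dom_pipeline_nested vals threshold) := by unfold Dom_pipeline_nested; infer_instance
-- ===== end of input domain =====

-- B replaces A's three sequential list-building loops with one pass keeping a sum-of-squares and a count accumulator (objective: simpler).

-- ===== PORT A =====
def pipeline_nested (vals : List Int) (threshold : Int) : Int :=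
  let filtered := vals.foldl (fun acc v => if v > threshold then acc ++ [v] else acc) []
  let squared := filtered.foldl (fun acc v => acc ++ [v * v]) []
  let total := squared.foldl (fun t v => t + v) 0
  total + (filtered.length : Int)

-- ===== PORT B =====
def pipeline_nested_alt (vals : List Int) (threshold : Int) : Int :=
  let p := vals.foldl (fun (s : Int × Int) v => if v > threshold then (s.1 + v * v, s.2 + 1) else s) (0, 0)
  p.1 + p.2

-- ===== PRECONDITION & SPEC =====
def Spec_pipeline_nested (vals : List Int) (threshold : Int) (out : Int) : Prop := out = pipeline_nested_alt vals threshold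
instance (vals : List Int) (threshold : Int) (out : Int) : Decidable (Spec_pipeline_nested vals threshold out) := by unfold Spec_pipeline_nested; infer_instance

-- ===== CLAIM (what is proved, stated in full; the proofs are below) =====
def Claim_equal_pipeline_nested : Prop := ∀ (vals : List Int) (threshold : Int), Dom_pipeline_nested vals threshold → Spec_pipeline_nested vals threshold (pipeline_nested vals threshold)

-- ===== LEMMAS AND PROOFS =====

-- B's paired fold computes (seed.1 + sum of squares of the filtered list, seed.2 + its length).
lemma pv_pairfold (l : List Int) (th t c : Int) :
    l.foldl (fun (s : Int × Int) v => if v > th then (s.1 + v * v, s.2 + 1) else s) (t, c)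
      = (t + (((l.filter (fun v => th < v)).map (fun v => v * v)).sum),
         c + ((l.filter (fun v => th < v)).length : Int)) := by
  induction l generalizing t c with
  | nil => simp
  | cons v vs ih =>
    by_cases h : th < v
    · simp [List.foldl_cons, h, ih]
      constructor <;> ring
    · simp [List.foldl_cons, h, ih]

-- ===== VERDICT (by name: the statement is the Claim_ definition above) =====
theorem pipeline_nested_spec : Claim_equal_pipeline_nested := by
  intro vals threshold _
  unfold Spec_pipeline_nested pipeline_nested pipeline_nested_alt
  simp only [PySem.List.foldl_append_ite_eq_filter, PySem.List.foldl_append_singleton_eq_map,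
    pv_pairfold]
  simp [← List.sum_eq_foldl]
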